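-- pv_equiv track=rewrite | github.com/Ritesh132/Python | Coin Flip.py | has_streak
-- ===== SOURCE A (Python) =====
-- def has_streak(flips, streak_length=6):
--     count = 1
--     for i in range(1, len(flips)):
--         if flips[i] == flips[i - 1]:
--             count += 1
--             if count == streak_length:
--                 return True
--         else:
--             count = 1
--     return False
-- ===== SOURCE B (Python) =====
-- def has_streak(flips, streak_length=6):
--     # A streak needs at least two equal consecutive flips, so thresholds below 2 never qualify.
--     if streak_length < 2:
--         return False
--     # Existence check over all windows of length streak_length: some window is constant.
--     return any(all(flips[i + j] == flips[i] for j in range(1, streak_length))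
--                for i in range(len(flips) - streak_length + 1))
-- ===== Notes on version B (the rewrite author's own statement) =====
-- stated objective: alternative
-- what changed: Replaces A's single left-to-right pass with a running consecutive counter and early return by a direct existence check: is there a window of streak_length consecutive positions whose flips are all equal (guarded by streak_length >= 2, the smallest threshold a consecutive-pair counter can ever reach).
import Mathlib
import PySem

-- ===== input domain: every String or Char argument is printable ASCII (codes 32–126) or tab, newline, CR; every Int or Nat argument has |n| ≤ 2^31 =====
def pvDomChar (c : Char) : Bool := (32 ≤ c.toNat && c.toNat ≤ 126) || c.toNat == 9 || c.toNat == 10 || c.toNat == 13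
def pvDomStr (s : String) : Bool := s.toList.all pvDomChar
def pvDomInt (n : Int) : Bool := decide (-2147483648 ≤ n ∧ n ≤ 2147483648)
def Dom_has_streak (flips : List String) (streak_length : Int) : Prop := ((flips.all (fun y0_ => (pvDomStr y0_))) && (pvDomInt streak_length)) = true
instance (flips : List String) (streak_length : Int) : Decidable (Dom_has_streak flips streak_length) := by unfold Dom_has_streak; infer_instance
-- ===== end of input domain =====

-- B replaces A's single-pass consecutive counter (early return) by a direct existence
-- check over all length-streak_length windows; same results, similar cost (alternative).


-- ===== PORT A =====
-- the loop 'for i in range(1, len(flips))' with state count and early return;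
-- both indices i and i-1 are always in range (1 ≤ i < len), so getD is exact for flips[i], flips[i-1]
def hasStreakLoopA (flips : List String) (k : Int) (i : Nat) (count : Int) : Bool :=
  if i < flips.length then
    if flips.getD i "" = flips.getD (i - 1) "" then
      if count + 1 = k then true
      else hasStreakLoopA flips k (i + 1) (count + 1)
    else hasStreakLoopA flips k (i + 1) 1
  else false
termination_by flips.length - i

def has_streak (flips : List String) (streak_length : Int) : Bool :=
  hasStreakLoopA flips streak_length 1 1

-- ===== PORT B =====
-- all indices i and i+j are in range (0 ≤ i ≤ len-k, 1 ≤ j ≤ k-1), so pyGetD is exact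
def has_streak_alt (flips : List String) (streak_length : Int) : Bool :=
  if streak_length < 2 then false
  else
    (PySem.List.pyRange 0 ((flips.length : Int) - streak_length + 1) 1).any fun i =>
      (PySem.List.pyRange 1 streak_length 1).all fun j =>
        PySem.List.pyGetD flips (i + j) "" = PySem.List.pyGetD flips i ""

-- ===== PRECONDITION & SPEC =====
def Spec_has_streak (flips : List String) (streak_length : Int) (out : Bool) : Prop := out = has_streak_alt flips streak_length
instance (flips : List String) (streak_length : Int) (out : Bool) : Decidable (Spec_has_streak flips streak_length out) := by unfold Spec_has_streak; infer_instance

-- ===== CLAIM (what is proved, stated in full; the proofs are below) =====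
def Claim_equal_has_streak : Prop := ∀ (flips : List String) (streak_length : Int), Dom_has_streak flips streak_length → Spec_has_streak flips streak_length (has_streak flips streak_length)

-- ===== LEMMAS AND PROOFS =====

-- structural version of A's loop: state (count, previous element, remaining elements)
def goA (k : Int) : Int → String → List String → Bool
  | _, _, [] => false
  | c, prev, f :: rest =>
    if f = prev then
      if c + 1 = k then true else goA k (c + 1) f rest
    else goA k 1 f rest

-- length of the longest prefix all of whose elements equal prev
def eqPrefix (prev : String) : List String → Nat
  | [] => 0
  | f :: rest => if f = prev then eqPrefix f rest + 1 else 0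

-- there is a constant block of kn consecutive elements
def hasRun (kn : Nat) (l : List String) : Prop :=
  ∃ i, i + kn ≤ l.length ∧ ∀ j < kn, l.getD (i + j) "" = l.getD i ""

theorem bridgeA (flips : List String) (k : Int) :
    ∀ (i : Nat) (c : Int), 1 ≤ i →
      hasStreakLoopA flips k i c = goA k c (flips.getD (i - 1) "") (flips.drop i) := by
  intro i c
  induction i, c using hasStreakLoopA.induct flips k with
  | case1 i c h heq hc =>
    intro hi
    rw [hasStreakLoopA, List.drop_eq_getElem_cons h, goA, if_pos h,
      List.getD_eq_getElem flips "" h]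
    rw [List.getD_eq_getElem flips "" h] at heq
    rw [if_pos heq, if_pos hc, if_pos heq, if_pos hc]
  | case2 i c h heq hc ih =>
    intro hi
    rw [hasStreakLoopA, List.drop_eq_getElem_cons h, goA, if_pos h,
      List.getD_eq_getElem flips "" h]
    rw [List.getD_eq_getElem flips "" h] at heq
    rw [if_pos heq, if_neg hc, if_pos heq, if_neg hc]
    have ih' := ih (by omega)
    rw [Nat.add_sub_cancel, List.getD_eq_getElem flips "" h] at ih'
    exact ih'
  | case3 i c h heq ih =>
    intro hi
    rw [hasStreakLoopA, List.drop_eq_getElem_cons h, goA, if_pos h,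
      List.getD_eq_getElem flips "" h]
    rw [List.getD_eq_getElem flips "" h] at heq
    rw [if_neg heq, if_neg heq]
    have ih' := ih (by omega)
    rw [Nat.add_sub_cancel, List.getD_eq_getElem flips "" h] at ih'
    exact ih'
  | case4 i c h =>
    intro hi
    rw [hasStreakLoopA, if_neg h, List.drop_eq_nil_of_le (by omega), goA]

theorem goA_false_of_k_le_one (k : Int) (hk : k ≤ 1) :
    ∀ (rest : List String) (c : Int) (prev : String), 1 ≤ c → goA k c prev rest = false := by
  intro rest
  induction rest with
  | nil => intro c prev _; rfl
  | cons f r ih =>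
    intro c prev hc
    rw [goA]
    split_ifs with h1 h2
    · omega
    · exact ih (c + 1) f (by omega)
    · exact ih 1 f le_rfl

theorem eqPrefix_le_length (prev : String) (l : List String) : eqPrefix prev l ≤ l.length := by
  induction l generalizing prev with
  | nil => exact le_rfl
  | cons f r ih =>
    rw [eqPrefix]
    split_ifs
    · simpa using ih f
    · simp

theorem getD_lt_eqPrefix (prev : String) (l : List String) :
    ∀ j < eqPrefix prev l, l.getD j "" = prev := by
  induction l generalizing prev with
  | nil => intro j hj; simp [eqPrefix] at hj
  | cons f r ih =>
    intro j hj
    rw [eqPrefix] at hj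
    split_ifs at hj with hf
    · cases j with
      | zero => simpa using hf
      | succ j' =>
        have := ih f j' (by omega)
        simpa [hf] using this
    · omega

theorem le_eqPrefix_of (prev : String) (l : List String) (t : Nat)
    (hlen : t ≤ l.length) (h : ∀ j < t, l.getD j "" = prev) : t ≤ eqPrefix prev l := by
  induction l generalizing prev t with
  | nil =>
    simp only [List.length_nil, Nat.le_zero] at hlen
    simp [hlen, eqPrefix]
  | cons f r ih =>
    cases t with
    | zero => exact Nat.zero_le _
    | succ t' =>
      have hf : f = prev := by simpa using h 0 (by omega)
      rw [eqPrefix, if_pos hf]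
      have hr : t' ≤ eqPrefix f r := by
        refine ih f t' (by simpa using hlen) ?_
        intro j hj
        have := h (j + 1) (by omega)
        simpa [hf] using this
      omega

theorem hasRun_cons (kn : Nat) (hk : 1 ≤ kn) (f : String) (r : List String) :
    hasRun kn (f :: r) ↔ kn ≤ 1 + eqPrefix f r ∨ hasRun kn r := by
  constructor
  · rintro ⟨i, hle, hall⟩
    cases i with
    | zero =>
      left
      have h0 : (f :: r).getD 0 "" = f := by simp
      have : kn - 1 ≤ eqPrefix f r := by
        refine le_eqPrefix_of f r (kn - 1) (by simpa using hle) ?_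
        intro j hj
        have := hall (j + 1) (by omega)
        simpa [h0] using this
      omega
    | succ i' =>
      right
      refine ⟨i', by simp only [List.length_cons] at hle; omega, ?_⟩
      intro j hj
      have := hall j hj
      simpa [Nat.succ_add] using this
  · rintro (hpre | ⟨i, hle, hall⟩)
    · refine ⟨0, ?_, ?_⟩
      · have := eqPrefix_le_length f r
        simp only [List.length_cons]
        omega
      · intro j hj
        cases j with
        | zero => rfl
        | succ j' =>
          have := getD_lt_eqPrefix f r j' (by omega)
          simpa using this
    · refine ⟨i + 1, by simp only [List.length_cons]; omega, ?_⟩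
      intro j hj
      have := hall j hj
      simpa [Nat.succ_add] using this

theorem goA_iff (k : Int) :
    ∀ (rest : List String) (prev : String) (c : Int), 1 ≤ c → c < k →
      (goA k c prev rest = true ↔ k ≤ c + (eqPrefix prev rest : Int) ∨ hasRun k.toNat rest) := by
  intro rest
  induction rest with
  | nil =>
    intro prev c hc hck
    rw [goA]
    constructor
    · intro h; cases h
    · rintro (h | ⟨i, hle, -⟩)
      · exfalso; simp only [eqPrefix] at h; push_cast at h; omega
      · exfalso; simp only [List.length_nil] at hle; omega
  | cons f r ih =>
    intro prev c hc hck
    rw [goA]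
    by_cases hf : f = prev
    · rw [if_pos hf]
      have hep : eqPrefix prev (f :: r) = eqPrefix f r + 1 := by rw [eqPrefix, if_pos hf]
      by_cases hck1 : c + 1 = k
      · rw [if_pos hck1]
        constructor
        · intro _; left; rw [hep]; push_cast; omega
        · intro _; rfl
      · rw [if_neg hck1, ih f (c + 1) (by omega) (by omega),
          hasRun_cons k.toNat (by omega) f r, hep]
        constructor
        · rintro (h | h)
          · left; push_cast at h ⊢; omega
          · right; right; exact h
        · rintro (h | h | h)
          · left; push_cast at h ⊢; omega
          · left; omega
          · right; exact h
    · rw [if_neg hf]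
      have hep : eqPrefix prev (f :: r) = 0 := by rw [eqPrefix, if_neg hf]
      rw [ih f 1 le_rfl (by omega), hasRun_cons k.toNat (by omega) f r, hep]
      constructor
      · rintro (h | h)
        · right; left; omega
        · right; right; exact h
      · rintro (h | h | h)
        · exfalso; push_cast at h; omega
        · left; omega
        · right; exact h

theorem A_iff (flips : List String) (k : Int) (hk : 2 ≤ k) :
    (has_streak flips k = true ↔ hasRun k.toNat flips) := by
  unfold has_streak
  rcases flips with _ | ⟨f, rest⟩
  · rw [hasStreakLoopA]
    constructor
    · intro h; simp at h
    · rintro ⟨i, hle, -⟩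
      exfalso; simp only [List.length_nil] at hle; omega
  · rw [bridgeA _ _ 1 1 le_rfl]
    show goA k 1 f rest = true ↔ _
    rw [goA_iff k rest f 1 le_rfl (by omega), hasRun_cons k.toNat (by omega) f rest]
    constructor
    · rintro (h | h)
      · left; omega
      · right; exact h
    · rintro (h | h)
      · left; omega
      · right; exact h

theorem B_iff (flips : List String) (k : Int) (hk : 2 ≤ k) :
    (has_streak_alt flips k = true ↔ hasRun k.toNat flips) := by
  unfold has_streak_alt
  rw [if_neg (by omega : ¬ k < 2), List.any_eq_true]
  constructor
  · rintro ⟨i, hmem, hall⟩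
    rw [PySem.List.mem_pyRange_one] at hmem
    obtain ⟨hi0, hiub⟩ := hmem
    rw [List.all_eq_true] at hall
    refine ⟨i.toNat, by omega, ?_⟩
    intro j hj
    by_cases hj0 : j = 0
    · simp [hj0]
    · have hmem' : (j : Int) ∈ PySem.List.pyRange 1 k 1 := by
        rw [PySem.List.mem_pyRange_one]; omega
      have hthis := hall (j : Int) hmem'
      rw [decide_eq_true_eq] at hthis
      have hin : 0 ≤ i + (j : Int) := by omega
      have hin2 : i + (j : Int) < (flips.length : Int) := by omega
      rw [PySem.List.pyGetD_eq_getElem _ _ hin hin2,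
        PySem.List.pyGetD_eq_getElem _ _ hi0 (by omega)] at hthis
      rw [List.getD_eq_getElem flips "" (by omega : i.toNat + j < flips.length),
        List.getD_eq_getElem flips "" (by omega : i.toNat < flips.length)]
      simpa [show (i + (j : Int)).toNat = i.toNat + j by omega] using hthis
  · rintro ⟨iN, hle, hall⟩
    refine ⟨(iN : Int), ?_, ?_⟩
    · rw [PySem.List.mem_pyRange_one]; omega
    · rw [List.all_eq_true]
      intro j hjmem
      rw [PySem.List.mem_pyRange_one] at hjmem
      rw [decide_eq_true_eq]
      have hthis := hall j.toNat (by omega)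
      rw [List.getD_eq_getElem flips "" (by omega : iN + j.toNat < flips.length),
        List.getD_eq_getElem flips "" (by omega : iN < flips.length)] at hthis
      rw [PySem.List.pyGetD_eq_getElem _ _ (by omega) (by omega),
        PySem.List.pyGetD_eq_getElem _ _ (by omega : (0:Int) ≤ iN) (by omega)]
      simpa [show ((iN : Int) + j).toNat = iN + j.toNat by omega] using hthis

-- ===== VERDICT (by name: the statement is the Claim_ definition above) =====
theorem has_streak_spec : Claim_equal_has_streak := by
  intro flips k _
  unfold Spec_has_streak
  by_cases hk : 2 ≤ k
  · rw [Bool.eq_iff_iff, A_iff flips k hk, B_iff flips k hk]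
  · have hk1 : k ≤ 1 := by omega
    have hB : has_streak_alt flips k = false := by
      unfold has_streak_alt; simp [show k < 2 by omega]
    rw [hB]
    unfold has_streak
    rcases flips with _ | ⟨f, rest⟩
    · simp [hasStreakLoopA]
    · rw [bridgeA _ _ 1 1 le_rfl]
      exact goA_false_of_k_le_one k hk1 _ 1 _ le_rfl
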